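-- pv_equiv track=rewrite | github.com/daniel-reich/ubiquitous-fiesta | ke4FSMdG2XYxbGQny_23.py | even_odd_transform
-- ===== SOURCE A (Python) =====
-- def even_odd_transform(lst, n):
--   for iteration in range(n):
--     for index in range(len(lst)):
--       if lst[index] % 2 == 0:
--         lst[index] -= 2
--       else:
--         lst[index] += 2
--   return lst
-- ===== SOURCE B (Python) =====
-- def even_odd_transform(lst, n):
--     m = max(n, 0)
--     return [x + 2 * m if x % 2 else x - 2 * m for x in lst]
-- ===== Notes on version B (the rewrite author's own statement) =====
-- stated objective: faster
-- what changed: Replaces the n-fold in-place sweep with a closed form: parity is invariant under +-2, so each element moves by 2n at once (even: -2n, odd: +2n).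
import Mathlib
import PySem

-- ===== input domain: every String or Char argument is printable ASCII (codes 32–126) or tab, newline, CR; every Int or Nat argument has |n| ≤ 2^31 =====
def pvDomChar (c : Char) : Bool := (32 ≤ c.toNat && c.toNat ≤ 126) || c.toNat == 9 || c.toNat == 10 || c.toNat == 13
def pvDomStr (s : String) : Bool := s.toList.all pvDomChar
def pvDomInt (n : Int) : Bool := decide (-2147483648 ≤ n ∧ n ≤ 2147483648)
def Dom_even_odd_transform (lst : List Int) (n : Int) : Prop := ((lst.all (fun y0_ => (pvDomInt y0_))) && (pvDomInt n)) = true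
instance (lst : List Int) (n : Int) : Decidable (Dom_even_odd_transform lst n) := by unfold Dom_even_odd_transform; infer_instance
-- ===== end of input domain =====

-- B computes the result in one pass by the closed form (parity is invariant under ±2);
-- A mutates its argument in place, B does not: the equivalence proved is about the return value.

-- ===== PORT A =====
def even_odd_transform (lst : List Int) (n : Int) : List Int :=
  (PySem.List.pyRange 0 n 1).foldl (fun cur _iteration =>
    (PySem.List.pyRange 0 (cur.length : Int) 1).foldl (fun acc index =>
      if PySem.Int.mod (PySem.List.pyGetD acc index 0) 2 = 0 then
        PySem.List.pySetD acc index (PySem.List.pyGetD acc index 0 - 2)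
      else
        PySem.List.pySetD acc index (PySem.List.pyGetD acc index 0 + 2)) cur) lst

-- ===== PORT B =====
def even_odd_transform_alt (lst : List Int) (n : Int) : List Int :=
  let m := max n 0
  lst.map (fun x => if PySem.Int.mod x 2 ≠ 0 then x + 2 * m else x - 2 * m)

-- ===== PRECONDITION & SPEC =====
def Spec_even_odd_transform (lst : List Int) (n : Int) (out : List Int) : Prop := out = even_odd_transform_alt lst n
instance (lst : List Int) (n : Int) (out : List Int) : Decidable (Spec_even_odd_transform lst n out) := by unfold Spec_even_odd_transform; infer_instance

-- ===== CLAIM (what is proved, stated in full; the proofs are below) =====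
def Claim_equal_even_odd_transform : Prop := ∀ (lst : List Int) (n : Int), Dom_even_odd_transform lst n → Spec_even_odd_transform lst n (even_odd_transform lst n)

-- ===== LEMMAS AND PROOFS =====

-- one element step of A's inner sweep
def pvStep (x : Int) : Int := if PySem.Int.mod x 2 = 0 then x - 2 else x + 2

-- A's inner index loop, started at index a with c positions remaining, maps pvStep over the suffix from a
theorem pv_inner_suffix (c : Nat) : ∀ (a : Nat) (l : List Int), a + c = l.length →
    (PySem.List.pyRange (a : Int) (l.length : Int) 1).foldl (fun acc index =>
      if PySem.Int.mod (PySem.List.pyGetD acc index 0) 2 = 0 then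
        PySem.List.pySetD acc index (PySem.List.pyGetD acc index 0 - 2)
      else
        PySem.List.pySetD acc index (PySem.List.pyGetD acc index 0 + 2)) l
    = l.take a ++ (l.drop a).map pvStep := by
  induction c with
  | zero =>
    intro a l hl
    rw [PySem.List.pyRange_one_eq_nil (by omega : (l.length : Int) ≤ (a : Int))]
    simp [List.drop_eq_nil_of_le (by omega : l.length ≤ a),
          List.take_of_length_le (by omega : l.length ≤ a)]
  | succ K ih =>
    intro a l hl
    have hrange : a < l.length := by omega
    have hcons : PySem.List.pyRange (a : Int) (l.length : Int) 1
        = (a : Int) :: PySem.List.pyRange ((a : Int) + 1) (l.length : Int) 1 := by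
      apply PySem.List.pyRange_one_cons; omega
    rw [hcons]
    simp only [List.foldl_cons]
    have hget : PySem.List.pyGetD l (a : Int) 0 = l[a] := by
      rw [PySem.List.pyGetD_natCast]; simp [hrange]
    set v := l[a] with hv
    have hset : ∀ w : Int, PySem.List.pySetD l (a : Int) w = l.set a w := by
      intro w; rw [PySem.List.pySetD_natCast]
    have key : ∀ w : Int,
        (PySem.List.pyRange ((a : Int) + 1) (l.length : Int) 1).foldl (fun acc index =>
          if PySem.Int.mod (PySem.List.pyGetD acc index 0) 2 = 0 then
            PySem.List.pySetD acc index (PySem.List.pyGetD acc index 0 - 2)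
          else
            PySem.List.pySetD acc index (PySem.List.pyGetD acc index 0 + 2)) (l.set a w)
        = l.take a ++ w :: (l.drop (a + 1)).map pvStep := by
      intro w
      have hlen2 : (((l.set a w).length : Nat) : Int) = (l.length : Int) := by simp
      have := ih (a + 1) (l.set a w) (by simp; omega)
      push_cast at this
      push_cast [hlen2] at this
      rw [this]
      have hda : (l.set a w).drop (a + 1) = l.drop (a + 1) :=
        List.drop_set_of_lt (by omega : a < a + 1)
      have hts : (l.set a w).take (a + 1) = l.take a ++ [w] := by
        rw [List.take_add_one, List.take_set_of_le (le_refl a)]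
        simp [hrange]
      rw [hts, hda]
      simp
    have hdrop : l.drop a = v :: l.drop (a + 1) := List.drop_eq_getElem_cons hrange
    by_cases hpar : PySem.Int.mod v 2 = 0
    · rw [if_pos (by rw [hget]; exact hpar), hget, hset, key, hdrop, List.map_cons,
          show pvStep v = v - 2 from by unfold pvStep; rw [if_pos hpar]]
    · rw [if_neg (by rw [hget]; exact hpar), hget, hset, key, hdrop, List.map_cons,
          show pvStep v = v + 2 from by unfold pvStep; rw [if_neg hpar]]

-- A's inner loop is exactly map pvStep
theorem pv_inner (l : List Int) :
    (PySem.List.pyRange 0 (l.length : Int) 1).foldl (fun acc index =>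
      if PySem.Int.mod (PySem.List.pyGetD acc index 0) 2 = 0 then
        PySem.List.pySetD acc index (PySem.List.pyGetD acc index 0 - 2)
      else
        PySem.List.pySetD acc index (PySem.List.pyGetD acc index 0 + 2)) l
    = l.map pvStep := by
  have := pv_inner_suffix l.length 0 l (by omega)
  simpa using this

-- parity is invariant under shifting by a multiple of 2
theorem pv_mod_add (x m : Int) : PySem.Int.mod (x + 2 * m) 2 = PySem.Int.mod x 2 := by
  simp only [PySem.Int.mod]
  exact Int.add_mul_fmod_self_left x 2 m

theorem pv_mod_sub (x m : Int) : PySem.Int.mod (x - 2 * m) 2 = PySem.Int.mod x 2 := by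
  rw [show x - 2 * m = x + 2 * (-m) by ring, pv_mod_add]

-- pvStep iterated k times is the closed form (parity is invariant under ±2)
theorem pv_step_iter (k : Nat) (x : Int) :
    pvStep^[k] x = if PySem.Int.mod x 2 ≠ 0 then x + 2 * k else x - 2 * k := by
  induction k with
  | zero => simp
  | succ m ihm =>
    rw [Function.iterate_succ_apply', ihm]
    by_cases h : PySem.Int.mod x 2 ≠ 0
    · simp only [if_pos h]
      have h2 : ¬ PySem.Int.mod (x + 2 * (m : Int)) 2 = 0 := by
        rw [pv_mod_add]; exact h
      simp only [pvStep, if_neg h2]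
      push_cast; ring
    · simp only [if_neg h]
      have h2 : PySem.Int.mod (x - 2 * (m : Int)) 2 = 0 := by
        rw [pv_mod_sub]; exact not_not.mp (by simpa using h)
      simp only [pvStep, if_pos h2]
      push_cast; ring

-- iterating map f is mapping the iterate of f
theorem pv_map_iterate {α : Type} (f : α → α) (k : Nat) (l : List α) :
    (List.map f)^[k] l = l.map f^[k] := by
  induction k generalizing l with
  | zero => simp
  | succ m ihm =>
    rw [Function.iterate_succ_apply', ihm, List.map_map, ← Function.iterate_succ']

-- a foldl that ignores the list elements is an iterate
theorem pv_foldl_iterate {α β : Type} (f : α → α) (r : List β) (init : α) :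
    r.foldl (fun acc _ => f acc) init = f^[r.length] init := by
  induction r generalizing init with
  | nil => simp
  | cons b t iht => simp [List.foldl_cons, iht, Function.iterate_succ_apply]

-- ===== VERDICT (by name: the statement is the Claim_ definition above) =====
theorem even_odd_transform_spec : Claim_equal_even_odd_transform := by
  intro lst n _hdom
  unfold Spec_even_odd_transform even_odd_transform even_odd_transform_alt
  have step1 : ∀ (cur : List Int),
      (PySem.List.pyRange 0 (cur.length : Int) 1).foldl (fun acc index =>
        if PySem.Int.mod (PySem.List.pyGetD acc index 0) 2 = 0 then
          PySem.List.pySetD acc index (PySem.List.pyGetD acc index 0 - 2)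
        else
          PySem.List.pySetD acc index (PySem.List.pyGetD acc index 0 + 2)) cur
      = cur.map pvStep := pv_inner
  calc (PySem.List.pyRange 0 n 1).foldl (fun cur _ =>
        (PySem.List.pyRange 0 (cur.length : Int) 1).foldl (fun acc index =>
          if PySem.Int.mod (PySem.List.pyGetD acc index 0) 2 = 0 then
            PySem.List.pySetD acc index (PySem.List.pyGetD acc index 0 - 2)
          else
            PySem.List.pySetD acc index (PySem.List.pyGetD acc index 0 + 2)) cur) lst
      = (PySem.List.pyRange 0 n 1).foldl (fun cur _ => cur.map pvStep) lst := by
        apply PySem.List.foldl_congr_mem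
        intro cur i _ ; exact step1 cur
    _ = (List.map pvStep)^[(PySem.List.pyRange 0 n 1).length] lst :=
        pv_foldl_iterate _ _ _
    _ = lst.map (pvStep^[(PySem.List.pyRange 0 n 1).length]) :=
        pv_map_iterate pvStep _ lst
    _ = lst.map (fun x => if PySem.Int.mod x 2 ≠ 0 then x + 2 * max n 0 else x - 2 * max n 0) := by
        apply List.map_congr_left
        intro x _
        rw [pv_step_iter]
        have : (((PySem.List.pyRange 0 n 1).length : Nat) : Int) = max n 0 := by
          rw [PySem.List.length_pyRange_one]; omega
        rw [this]
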